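-- pv_equiv track=rewrite | github.com/code-study-classes/python-basics-Matvizzy | practice_package/loops.py | count_vowel_triplets
-- ===== SOURCE A (Python) =====
-- def count_vowel_triplets(text):
--     vowels = 'aeiouy'
--     text = text.lower()
--     count = 0
--     for i in range(len(text) - 2):
--         if text[i] in vowels and text[i+1] in vowels and text[i+2] in vowels:
--             count += 1
--     return count
-- ===== SOURCE B (Python) =====
-- def count_vowel_triplets(text):
--     runs = []
--     run = 0
--     for ch in text.lower():
--         if ch in "aeiouy":
--             run += 1
--         else:
--             runs.append(run)
--             run = 0
--     runs.append(run)
--     return sum(L - 2 for L in runs if L >= 3)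
-- ===== Notes on version B (the rewrite author's own statement) =====
-- stated objective: alternative
-- what changed: Replaces A's per-index scan that re-reads three fixed offsets text[i..i+2] for every window start by a run-length decomposition: one pass collects the maximal vowel-run lengths, then the answer is the sum of (L - 2) over runs of length >= 3.
import Mathlib
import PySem

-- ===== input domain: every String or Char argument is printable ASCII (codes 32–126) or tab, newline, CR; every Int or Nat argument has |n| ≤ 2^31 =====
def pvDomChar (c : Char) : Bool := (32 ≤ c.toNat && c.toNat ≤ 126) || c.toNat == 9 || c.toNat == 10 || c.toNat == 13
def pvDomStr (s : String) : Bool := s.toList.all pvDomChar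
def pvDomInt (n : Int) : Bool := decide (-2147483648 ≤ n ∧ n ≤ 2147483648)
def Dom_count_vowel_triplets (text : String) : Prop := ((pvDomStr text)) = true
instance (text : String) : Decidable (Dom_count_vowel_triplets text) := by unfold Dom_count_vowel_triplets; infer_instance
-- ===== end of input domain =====

-- B replaces A's per-index triple lookup by a run-length decomposition: it collects the
-- maximal vowel-run lengths and returns sum of (L - 2) over runs of length ≥ 3 (alternative decomposition).

-- ===== PORT A =====
-- literal port of A: fold over range(len(text) - 2), testing text[i], text[i+1], text[i+2].
-- indices produced by the range are always in bounds, so the pyGetD default ' ' is never used.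
def count_vowel_triplets (text : String) : Int :=
  let cs := PySem.Chars.lower text.toList
  (PySem.List.pyRange 0 ((cs.length : Int) - 2) 1).foldl
    (fun count i =>
      if "aeiouy".toList.contains (PySem.List.pyGetD cs i ' ')
         && "aeiouy".toList.contains (PySem.List.pyGetD cs (i+1) ' ')
         && "aeiouy".toList.contains (PySem.List.pyGetD cs (i+2) ' ')
      then count + 1 else count) 0

-- ===== PORT B =====
-- literal port of Source B: one fold building the list of vowel-run lengths, then the sum
-- of (L - 2) over the runs with L >= 3 (the generator expression, as filter + fold).
def count_vowel_triplets_alt (text : String) : Int :=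
  let st := (PySem.Chars.lower text.toList).foldl
      (fun (s : List Int × Int) ch =>
        if "aeiouy".toList.contains ch then (s.1, s.2 + 1) else (s.1 ++ [s.2], 0))
      (([] : List Int), 0)
  let runs := st.1 ++ [st.2]
  (runs.filter (fun L => decide (3 ≤ L))).foldl (fun acc L => acc + (L - 2)) 0

-- ===== PRECONDITION & SPEC =====
def Spec_count_vowel_triplets (text : String) (out : Int) : Prop := out = count_vowel_triplets_alt text
instance (text : String) (out : Int) : Decidable (Spec_count_vowel_triplets text out) := by unfold Spec_count_vowel_triplets; infer_instance

-- ===== CLAIM (what is proved, stated in full; the proofs are below) =====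
def Claim_equal_count_vowel_triplets : Prop := ∀ (text : String), Dom_count_vowel_triplets text → Spec_count_vowel_triplets text (count_vowel_triplets text)

-- ===== LEMMAS AND PROOFS =====

/-- vowel test shared by the proofs -/
def isV (c : Char) : Bool := "aeiouy".toList.contains c

/-- number of triple-vowel windows, by peeling the leftmost window -/
def cnt : List Char → Nat
  | a :: b :: c :: tl => (if isV a && isV b && isV c then 1 else 0) + cnt (b :: c :: tl)
  | _ => 0

/-- windows counted left-to-right, carrying the vowel flags of the two previous chars -/
def cnt2 (p q : Bool) : List Char → Int
  | [] => 0
  | c :: cs => (if p && q && isV c then 1 else 0) + cnt2 q (isV c) cs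

/-- score of the remaining input given the current run length (B's remaining work) -/
def gg (run : Int) : List Char → Int
  | [] => if 3 ≤ run then run - 2 else 0
  | c :: cs => if isV c then gg (run + 1) cs else (if 3 ≤ run then run - 2 else 0) + gg 0 cs

-- ---- A = cnt ----

def W (cs : List Char) (k : Nat) : Bool :=
  isV (cs.getD k ' ') && isV (cs.getD (k+1) ' ') && isV (cs.getD (k+2) ' ')

theorem countP_range_eq_cnt (cs : List Char) :
    (List.range (cs.length - 2)).countP (W cs) = cnt cs := by
  induction cs using cnt.induct with
  | case1 a b c tl ih =>
      have hlen : (a :: b :: c :: tl).length - 2 = tl.length + 1 := by simp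
      rw [hlen, List.range_succ_eq_map, List.countP_cons, List.countP_map]
      have h1 : (W (a :: b :: c :: tl) ∘ Nat.succ) = W (b :: c :: tl) := by
        funext k; simp [W, Function.comp]
      have h0 : W (a :: b :: c :: tl) 0 = (isV a && isV b && isV c) := by
        simp [W]
      have h2 : (b :: c :: tl).length - 2 = tl.length := by simp
      rw [h1, h0, ← h2, ih, cnt]
      cases hv : (isV a && isV b && isV c) <;> simp <;> omega
  | case2 cs h =>
      match cs with
      | [] => simp [cnt]
      | [a] => simp [cnt]
      | [a, b] => simp [cnt]
      | a :: b :: c :: tl => exact absurd rfl (h a b c tl)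

theorem portA_eq_cnt (cs : List Char) :
    (PySem.List.pyRange 0 ((cs.length : Int) - 2) 1).foldl
      (fun count i =>
        if "aeiouy".toList.contains (PySem.List.pyGetD cs i ' ')
           && "aeiouy".toList.contains (PySem.List.pyGetD cs (i+1) ' ')
           && "aeiouy".toList.contains (PySem.List.pyGetD cs (i+2) ' ')
        then count + 1 else count) 0 = (cnt cs : Int) := by
  rw [PySem.List.foldl_if_add_one, PySem.List.pyRange_one, List.countP_map]
  have hcast : ((cs.length : Int) - 2 - 0).toNat = cs.length - 2 := by omega
  rw [hcast, ← countP_range_eq_cnt cs, zero_add]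
  congr 1
  apply List.countP_congr
  intro k hk
  simp only [List.mem_range] at hk
  simp only [Function.comp, zero_add]
  have e1 : ((k : Int) + 1) = ((k + 1 : Nat) : Int) := by push_cast; ring
  have e2 : ((k : Int) + 2) = ((k + 2 : Nat) : Int) := by push_cast; ring
  rw [e1, e2, PySem.List.pyGetD_natCast, PySem.List.pyGetD_natCast, PySem.List.pyGetD_natCast]
  simp [W, isV]

-- ---- B = gg 0 = cnt2 false false = cnt ----

/-- score of a single run -/
def sc (r : Int) : Int := if 3 ≤ r then r - 2 else 0

theorem scoreRuns_append (rs : List Int) (r : Int) :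
    ((rs ++ [r]).filter (fun L => decide (3 ≤ L))).foldl (fun acc L => acc + (L - 2)) 0
      = (rs.filter (fun L => decide (3 ≤ L))).foldl (fun acc L => acc + (L - 2)) 0 + sc r := by
  rw [List.filter_append, List.foldl_append]
  by_cases h : (3 : Int) ≤ r
  · simp [h, sc]
  · simp [h, sc]

theorem machine_eq_gg (cs : List Char) (rs : List Int) (run : Int) :
    (let st := cs.foldl
        (fun (s : List Int × Int) ch =>
          if "aeiouy".toList.contains ch then (s.1, s.2 + 1) else (s.1 ++ [s.2], 0)) (rs, run)
     ((st.1 ++ [st.2]).filter (fun L => decide (3 ≤ L))).foldl (fun acc L => acc + (L - 2)) 0)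
      = (rs.filter (fun L => decide (3 ≤ L))).foldl (fun acc L => acc + (L - 2)) 0 + gg run cs := by
  induction cs generalizing rs run with
  | nil =>
      simp only [List.foldl_nil]
      rw [scoreRuns_append]
      simp [gg, sc]
  | cons c cs ih =>
      simp only [List.foldl_cons, gg]
      by_cases h : isV c
      · rw [if_pos (by simpa [isV] using h), if_pos h]
        exact ih rs (run + 1)
      · rw [if_neg (by simpa [isV] using h), if_neg h]
        rw [ih (rs ++ [run]) 0, scoreRuns_append]
        simp [sc]; ring

theorem gg_eq_cnt2 (cs : List Char) (run : Int) (h : 0 ≤ run) :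
    gg run cs = sc run + cnt2 (decide (2 ≤ run)) (decide (1 ≤ run)) cs := by
  induction cs generalizing run with
  | nil => simp [gg, cnt2, sc]
  | cons c cs ih =>
      by_cases hv : isV c
      · rw [gg, if_pos hv, ih (run + 1) (by omega), cnt2, hv]
        have h2 : decide (2 ≤ run + 1) = decide (1 ≤ run) := by
          simp only [decide_eq_decide]; omega
        have h1 : decide (1 ≤ run + 1) = true := by simp only [decide_eq_true_eq]; omega
        rw [h2, h1]
        generalize cnt2 (decide (1 ≤ run)) true cs = t
        rcases le_or_gt 2 run with hr | hr
        · rw [show decide ((2:Int) ≤ run) = true from by simpa using hr,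
              show decide ((1:Int) ≤ run) = true from by simp; omega]
          simp only [Bool.and_self]
          simp only [sc]; split_ifs <;> omega
        · rw [show decide ((2:Int) ≤ run) = false from by simp; omega]
          simp only [Bool.false_and, Bool.false_eq_true, if_false]
          simp only [sc]; split_ifs <;> omega
      · have hv' : isV c = false := by simpa using hv
        rw [gg, if_neg hv, ih 0 (by omega), cnt2, hv']
        have hfix : ∀ p : Bool, cnt2 p false cs = cnt2 false false cs := by
          intro p; cases cs <;> simp [cnt2]
        rw [hfix]
        simp [sc]
        

theorem cnt2_eq_cnt_aux (cs : List Char) (a b : Char) :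
    cnt2 (isV a) (isV b) cs = (cnt (a :: b :: cs) : Int) := by
  induction cs generalizing a b with
  | nil => simp [cnt2, cnt]
  | cons c cs ih => rw [cnt2, ih b c, cnt]; push_cast; ring

theorem cnt2_ff_eq_cnt (cs : List Char) : cnt2 false false cs = (cnt cs : Int) := by
  match cs with
  | [] => simp [cnt2, cnt]
  | [a] => simp [cnt2, cnt]
  | a :: b :: cs =>
      rw [cnt2, cnt2, cnt2_eq_cnt_aux cs a b]
      simp

-- ===== VERDICT (by name: the statement is the Claim_ definition above) =====
theorem count_vowel_triplets_spec : Claim_equal_count_vowel_triplets := by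
  intro text _
  unfold Spec_count_vowel_triplets count_vowel_triplets count_vowel_triplets_alt
  rw [portA_eq_cnt]
  have hm := machine_eq_gg (PySem.Chars.lower text.toList) [] 0
  simp only [] at hm
  rw [hm]
  rw [gg_eq_cnt2 _ 0 (by omega)]
  simp only [List.filter_nil, List.foldl_nil]
  rw [show (decide ((2:Int) ≤ 0)) = false from by decide,
      show (decide ((1:Int) ≤ 0)) = false from by decide,
      cnt2_ff_eq_cnt]
  simp [sc]
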